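-- pv_equiv track=rewrite | github.com/evert823/numeral_converter | mixed_radix_numeral_converter.py | _bases_valid
-- ===== SOURCE A (Python) =====
-- def _bases_valid(bases: list[int]) -> bool:
--     if type(bases) != list:
--         return False
--     if len(bases) < 1:
--         return False
--
--     combined_product = 1
--     for base in bases:
--         if type(base) != int:
--             return False
--         combined_product *= base
--         if base < 1:
--             return False
--     if combined_product <= 1:
--         return False
--
--     return True
-- ===== SOURCE B (Python) =====
-- def _bases_valid(bases: list[int]) -> bool:
--     if type(bases) != list:
--         return False
--     if len(bases) < 1:
--         return False
--     if any(type(b) != int for b in bases):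
--         return False
--     if any(b < 1 for b in bases):
--         return False
--     return any(b > 1 for b in bases)
-- ===== Notes on version B (the rewrite author's own statement) =====
-- stated objective: simpler
-- what changed: Replaces the single loop that accumulates a running product (with early returns) by three direct predicate passes: reject any non-int, reject any base < 1, then return whether any base exceeds 1 (with all bases >= 1, product > 1 iff some base > 1), so no product is maintained.
import Mathlib
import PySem

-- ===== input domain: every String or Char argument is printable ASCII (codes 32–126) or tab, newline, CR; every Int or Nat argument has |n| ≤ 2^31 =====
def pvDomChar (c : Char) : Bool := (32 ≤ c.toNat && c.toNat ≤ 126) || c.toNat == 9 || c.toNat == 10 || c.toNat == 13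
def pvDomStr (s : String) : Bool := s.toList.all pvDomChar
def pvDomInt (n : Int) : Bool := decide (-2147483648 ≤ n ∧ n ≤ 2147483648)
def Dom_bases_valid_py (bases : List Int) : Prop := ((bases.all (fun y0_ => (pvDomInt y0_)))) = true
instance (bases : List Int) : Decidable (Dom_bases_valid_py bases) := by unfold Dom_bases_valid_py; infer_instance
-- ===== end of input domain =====

-- B replaces the running-product loop with direct predicate passes; same return value, no speed claim.
-- ===== PORT A =====
-- loop body of A: carries the running product; early-returns false on base < 1,
-- and after the loop returns false iff the product is <= 1.
def basesValidLoopA (l : List Int) (combined_product : Int) : Bool :=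
  match l with
  | [] => if combined_product ≤ 1 then false else true
  | base :: rest =>
    let combined_product := combined_product * base
    if base < 1 then false else basesValidLoopA rest combined_product

def bases_valid_py (bases : List Int) : Bool :=
  if bases.length < 1 then false
  else basesValidLoopA bases 1

-- ===== PORT B =====
def bases_valid_py_alt (bases : List Int) : Bool :=
  if bases.isEmpty then false
  else if bases.any (fun b => decide (b < 1)) then false
  else bases.any (fun b => decide (1 < b))

-- ===== PRECONDITION & SPEC =====
def Spec_bases_valid_py (bases : List Int) (out : Bool) : Prop := out = bases_valid_py_alt bases
instance (bases : List Int) (out : Bool) : Decidable (Spec_bases_valid_py bases out) := by unfold Spec_bases_valid_py; infer_instance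

-- ===== CLAIM (what is proved, stated in full; the proofs are below) =====
def Claim_equal_bases_valid_py : Prop := ∀ (bases : List Int), Dom_bases_valid_py bases → Spec_bases_valid_py bases (bases_valid_py bases)

-- ===== LEMMAS AND PROOFS =====
-- Characterisation of A's loop: with a product accumulator p ≥ 1 it returns true
-- iff every base is ≥ 1 and (p > 1 or some base > 1).
theorem basesValidLoopA_char (l : List Int) (p : Int) (hp : 1 ≤ p) :
    basesValidLoopA l p =
      (l.all (fun b => decide (1 ≤ b)) && (decide (1 < p) || l.any (fun b => decide (1 < b)))) := by
  induction l generalizing p with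
  | nil =>
    simp only [basesValidLoopA, List.all_nil, List.any_nil, Bool.true_and, Bool.or_false]
    by_cases h : p ≤ 1
    · rw [if_pos h]; simp; omega
    · rw [if_neg h]; simp; omega
  | cons b rest ih =>
    simp only [basesValidLoopA, List.all_cons, List.any_cons]
    by_cases hb : b < 1
    · rw [if_pos hb]
      have : decide (1 ≤ b) = false := by simp; omega
      simp [this]
    · rw [if_neg hb]
      rw [not_lt] at hb
      rw [ih (p * b) (by nlinarith)]
      have hmul : decide (1 < p * b) = (decide (1 < p) || decide (1 < b)) := by
        rw [Bool.eq_iff_iff]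
        simp only [decide_eq_true_eq, Bool.or_eq_true, decide_eq_true_eq]
        constructor
        · intro h
          by_contra hc
          rw [not_or] at hc; rw [not_lt, not_lt] at hc
          nlinarith [hc.1, hc.2]
        · rintro (h | h) <;> nlinarith
      rw [hmul]
      have hb1 : decide (1 ≤ b) = true := by simp [hb]
      rw [hb1]
      simp [Bool.or_assoc]

-- ===== VERDICT (by name: the statement is the Claim_ definition above) =====
theorem bases_valid_py_spec : Claim_equal_bases_valid_py := by
  intro bases _
  unfold Spec_bases_valid_py bases_valid_py bases_valid_py_alt
  cases bases with
  | nil => simp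
  | cons b rest =>
    rw [basesValidLoopA_char _ 1 (by omega)]
    simp only [List.length_cons, List.isEmpty_cons]
    by_cases h : (b :: rest).any (fun x => decide (x < 1))
    · simp only [h]
      have : ¬ ((b :: rest).all (fun x => decide (1 ≤ x)) = true) := by
        simp only [List.any_eq_true, List.all_eq_true] at h ⊢
        obtain ⟨x, hx, hlt⟩ := h
        intro hall
        have := hall x hx
        simp at hlt this; omega
      simp_all
    · have hall : (b :: rest).all (fun x => decide (1 ≤ x)) = true := by
        simp only [List.any_eq_true, List.all_eq_true] at h ⊢
        intro x hx; by_contra hc; exact h ⟨x, hx, by simp at hc ⊢; omega⟩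
      simp [h, hall]
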